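-- pv_equiv track=rewrite | github.com/pu-meng/twostage-medseg | analysis/analyze_two_mintor.py | count_summary
-- ===== SOURCE A (Python) =====
-- TINY_MAX = 5_000
--
-- SMALL_MAX = 50_000
--
-- MED_MAX = 300_000
--
-- def count_summary(all_splits, split_names):
--     cats = ["无肿瘤", "极小", "小", "中等", "大"]
--     lines = []
--     lines.append("=" * 70)
--     lines.append("汇总统计")
--     lines.append("=" * 70)
--     header = f"  {'类别':<8}" + "".join(f"  {n:<10}" for n in split_names + ["合计"])
--     lines.append(header)
--     lines.append("  " + "-" * 58)
--     for cat in cats: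
--         counts = [sum(1 for r in rows if r[3] == cat) for rows in all_splits]
--         total = sum(counts)
--         lines.append(
--             f"  {cat:<8}" + "".join(f"  {c:<10}" for c in counts) + f"  {total:<10}"
--         )
--     lines.append("  " + "-" * 58)
--     grand = [len(rows) for rows in all_splits]
--     #all_splits是一个列表,包含了train_rows, monitor_rows, test_rows三个列表,每个列表里是若干个元组(name,liver_vox,tumor_vox,cat),len(rows)就是每个split的案例数量
--     lines.append(
--         f"  {'合计':<8}" + "".join(f"  {c:<10}" for c in grand) + f"  {sum(grand):<10}"
--     )
--     lines.append("")
--     lines.append("阈值说明:")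
--     lines.append(f"  极小: tumor < {TINY_MAX:,} 体素")
--     lines.append(f"  小:   {TINY_MAX:,} <= tumor < {SMALL_MAX:,} 体素")
--     lines.append(f"  中等: {SMALL_MAX:,} <= tumor < {MED_MAX:,} 体素")
--     lines.append(f"  大:   tumor >= {MED_MAX:,} 体素")
--     lines.append("")
--     lines.append("划分说明:")
--     lines.append("  train:   112个全部参与训练(包含monitor子集)")
--     lines.append(
--         "  monitor: 12个,train的子集,覆盖各类别,用于训练中监控dice/选best ckpt"
--     )
--     lines.append("  test:    19个,nnUNet fold0验证集,用于最终和nnUNet对比")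
--     return "\n".join(lines)
-- ===== SOURCE B (Python) =====
-- TINY_MAX = 5_000
--
-- SMALL_MAX = 50_000
--
-- MED_MAX = 300_000
--
-- CATS = ["无肿瘤", "极小", "小", "中等", "大"]
-- _IDX = {c: i for i, c in enumerate(CATS)}
--
-- def _fmt_row(label, cells):
--     return f"  {label:<8}" + "".join(f"  {c:<10}" for c in cells)
--
-- def count_summary(all_splits, split_names):
--     # numeric phase: ONE pass over each split fills a 5-slot count vector
--     mat = []
--     for rows in all_splits:
--         vec = [0, 0, 0, 0, 0]
--         for r in rows:
--             i = _IDX.get(r[3])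
--             if i is not None:
--                 vec[i] += 1
--         mat.append(vec)
--     grand = [len(rows) for rows in all_splits]
--     # formatting phase: transpose the matrix into per-category table lines
--     bar = "=" * 70
--     sep = "  " + "-" * 58
--     table = [
--         _fmt_row(CATS[j], [v[j] for v in mat] + [sum(v[j] for v in mat)])
--         for j in range(5)
--     ]
--     return "\n".join(
--         [bar, "汇总统计", bar, _fmt_row("类别", split_names + ["合计"]), sep]
--         + table
--         + [sep, _fmt_row("合计", grand + [sum(grand)]),
--            "",
--            "阈值说明:",
--            f"  极小: tumor < {TINY_MAX:,} 体素",
--            f"  小:   {TINY_MAX:,} <= tumor < {SMALL_MAX:,} 体素",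
--            f"  中等: {SMALL_MAX:,} <= tumor < {MED_MAX:,} 体素",
--            f"  大:   tumor >= {MED_MAX:,} 体素",
--            "",
--            "划分说明:",
--            "  train:   112个全部参与训练(包含monitor子集)",
--            "  monitor: 12个,train的子集,覆盖各类别,用于训练中监控dice/选best ckpt",
--            "  test:    19个,nnUNet fold0验证集,用于最终和nnUNet对比"]
--     )
-- ===== Notes on version B (the rewrite author's own statement) =====
-- stated objective: alternative
-- what changed: B separates a numeric phase from a formatting phase: one pass over each split fills a fixed 5-slot count vector indexed via a category->index map (instead of A's rescan of every split once per category), and the line formatting is factored into a single uniform row formatter used for the header, the five transposed matrix rows and the grand row; the grand totals stay len(rows)-based.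
import Mathlib
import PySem

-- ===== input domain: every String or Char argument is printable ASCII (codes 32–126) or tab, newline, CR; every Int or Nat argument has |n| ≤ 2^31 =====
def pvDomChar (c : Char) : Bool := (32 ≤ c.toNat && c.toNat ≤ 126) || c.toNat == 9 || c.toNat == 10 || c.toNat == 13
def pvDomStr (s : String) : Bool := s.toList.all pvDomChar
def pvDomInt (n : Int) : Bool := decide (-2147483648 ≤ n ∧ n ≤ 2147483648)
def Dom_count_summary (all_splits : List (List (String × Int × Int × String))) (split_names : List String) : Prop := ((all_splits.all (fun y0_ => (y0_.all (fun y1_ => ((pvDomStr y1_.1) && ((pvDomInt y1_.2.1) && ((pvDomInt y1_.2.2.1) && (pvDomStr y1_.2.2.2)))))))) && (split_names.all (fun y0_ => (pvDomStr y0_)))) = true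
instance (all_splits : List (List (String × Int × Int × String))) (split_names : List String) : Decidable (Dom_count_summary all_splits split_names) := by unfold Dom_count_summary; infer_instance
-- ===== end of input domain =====

-- B separates a numeric phase (one pass per split filling a fixed 5-slot count vector via a
-- category->index map, then transposed) from a uniform formatting phase (objective: alternative).

-- shared formatting helpers (exact ports of the f-string pieces)
-- "x" * n for a single character x (Python string repetition of a 1-char string)
def pvRep (c : Char) (n : Nat) : String := String.ofList (List.replicate n c)
-- f"{s:<w}": left-justify by character count; no padding when len(s) ≥ w (Nat subtraction)
def pvLJ (s : String) (w : Nat) : String := s ++ pvRep ' ' (w - s.toList.length)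
-- f"{c:<10}" for an int c: str(c) then pad
def pvLJI (n : Int) : String := pvLJ (PySem.Int.toStr n) 10
-- the footer lines after the table; the f"{…:,}" thresholds are constants, rendered as the literals
-- CPython produces ("5,000", "50,000", "300,000")
def pvFooterLines : List String :=
  ["", "阈值说明:",
   "  极小: tumor < 5,000 体素",
   "  小:   5,000 <= tumor < 50,000 体素",
   "  中等: 50,000 <= tumor < 300,000 体素",
   "  大:   tumor >= 300,000 体素",
   "", "划分说明:",
   "  train:   112个全部参与训练(包含monitor子集)",
   "  monitor: 12个,train的子集,覆盖各类别,用于训练中监控dice/选best ckpt",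
   "  test:    19个,nnUNet fold0验证集,用于最终和nnUNet对比"]

-- ===== PORT A =====
def count_summary (all_splits : List (List (String × Int × Int × String))) (split_names : List String) : String :=
  let cats : List String := ["无肿瘤", "极小", "小", "中等", "大"]
  let lines : List String := []
  let lines := lines ++ [pvRep '=' 70]
  let lines := lines ++ ["汇总统计"]
  let lines := lines ++ [pvRep '=' 70]
  let header := "  " ++ pvLJ "类别" 8 ++
    PySem.Str.join "" ((split_names ++ ["合计"]).map (fun n => "  " ++ pvLJ n 10))
  let lines := lines ++ [header]
  let lines := lines ++ ["  " ++ pvRep '-' 58]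
  let lines := cats.foldl (fun ls cat =>
    let counts := all_splits.map (fun rows =>
      rows.foldl (fun acc r => if r.2.2.2 == cat then acc + 1 else acc) (0 : Int))
    let total := counts.foldl (· + ·) (0 : Int)
    ls ++ ["  " ++ pvLJ cat 8 ++ PySem.Str.join "" (counts.map (fun c => "  " ++ pvLJI c)) ++
           "  " ++ pvLJI total]) lines
  let lines := lines ++ ["  " ++ pvRep '-' 58]
  let grand := all_splits.map (fun rows => (rows.length : Int))
  let lines := lines ++ ["  " ++ pvLJ "合计" 8 ++
    PySem.Str.join "" (grand.map (fun c => "  " ++ pvLJI c)) ++ "  " ++ pvLJI (grand.foldl (· + ·) (0 : Int))]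
  let lines := lines ++ pvFooterLines
  PySem.Str.join "\n" lines

-- ===== PORT B =====
-- module-level CATS and _IDX = {c: i for i, c in enumerate(CATS)}
def pvCats : List String := ["无肿瘤", "极小", "小", "中等", "大"]
def pvIdx : PySem.Dict String Int :=
  (PySem.List.enumerate pvCats 0).foldl (fun d p => d.insert p.2 p.1) PySem.Dict.empty
-- _fmt_row(label, cells): cells already rendered as strings (Python's f"{c:<10}" on an int is
-- str(c) padded; the int call sites below map PySem.Int.toStr first)
def pvFmtRow (label : String) (cells : List String) : String :=
  "  " ++ pvLJ label 8 ++ PySem.Str.join "" (cells.map (fun s => "  " ++ pvLJ s 10))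

def count_summary_alt (all_splits : List (List (String × Int × Int × String))) (split_names : List String) : String :=
  -- numeric phase: one pass per split; vec[i] += 1 — _IDX only holds 0..4, so i.toNat is exact
  let mat := all_splits.foldl (fun ms rows =>
    ms ++ [rows.foldl (fun vec r =>
      match pvIdx.get? r.2.2.2 with
      | none => vec
      | some i => vec.set i.toNat (vec.getD i.toNat 0 + 1)) ([0, 0, 0, 0, 0] : List Int)]) []
  let grand := all_splits.map (fun rows => (rows.length : Int))
  let bar := pvRep '=' 70
  let sep := "  " ++ pvRep '-' 58
  -- formatting phase: transpose mat into per-category lines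
  let table := (List.range 5).map (fun j =>
    pvFmtRow (pvCats.getD j "")
      ((mat.map (fun v => v.getD j 0) ++ [(mat.map (fun v => v.getD j 0)).foldl (· + ·) (0 : Int)]).map PySem.Int.toStr))
  PySem.Str.join "\n"
    ([bar, "汇总统计", bar, pvFmtRow "类别" (split_names ++ ["合计"]), sep]
      ++ table
      ++ [sep, pvFmtRow "合计" ((grand ++ [grand.foldl (· + ·) (0 : Int)]).map PySem.Int.toStr)]
      ++ pvFooterLines)

-- ===== PRECONDITION & SPEC =====
def Spec_count_summary (all_splits : List (List (String × Int × Int × String))) (split_names : List String) (out : String) : Prop := out = count_summary_alt all_splits split_names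
instance (all_splits : List (List (String × Int × Int × String))) (split_names : List String) (out : String) : Decidable (Spec_count_summary all_splits split_names out) := by unfold Spec_count_summary; infer_instance

-- ===== CLAIM (what is proved, stated in full; the proofs are below) =====
def Claim_equal_count_summary : Prop := ∀ (all_splits : List (List (String × Int × Int × String))) (split_names : List String), Dom_count_summary all_splits split_names → Spec_count_summary all_splits split_names (count_summary all_splits split_names)

-- ===== LEMMAS AND PROOFS =====

-- "".join(parts + [x]) = "".join(parts) + x, on the List Char side
theorem chars_join_append_singleton (xs : List (List Char)) (x : List Char) :
    PySem.Chars.join [] (xs ++ [x]) = PySem.Chars.join [] xs ++ x := by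
  induction xs with
  | nil => simp [PySem.Chars.join_nil, PySem.Chars.join_singleton]
  | cons a t ih =>
    cases t with
    | nil => simp [PySem.Chars.join_singleton, PySem.Chars.join_cons_cons]
    | cons b u => simp [PySem.Chars.join_cons_cons] at ih ⊢; simp [ih]

-- the same on Strings
theorem str_join_append_singleton (xs : List String) (x : String) :
    PySem.Str.join "" (xs ++ [x]) = PySem.Str.join "" xs ++ x := by
  apply String.toList_injective
  simp [chars_join_append_singleton]

-- _IDX.get(c) written out
set_option maxRecDepth 8192 in
theorem pvIdx_get (c : String) :
    pvIdx.get? c = if "无肿瘤" = c then some 0 else if "极小" = c then some 1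
      else if "小" = c then some 2 else if "中等" = c then some 3
      else if "大" = c then some 4 else none := by
  have h : pvIdx = PySem.Dict.mk [("无肿瘤", 0), ("极小", 1), ("小", 2), ("中等", 3), ("大", 4)] := by decide
  rw [h]
  simp only [PySem.Dict.get?_mk_cons, beq_iff_eq]
  have hnil : (PySem.Dict.mk ([] : List (String × Int))).get? c = none := by
    simp [PySem.Dict.get?]
  rw [hnil]

-- the fold filling the 5-slot vector: slot j holds the count of rows mapped to j by _IDX
theorem vec_invariant (rows : List (String × Int × Int × String)) (vec : List Int)
    (hlen : vec.length = 5) (j : Nat) (hj : j < 5) :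
    (rows.foldl (fun vec r =>
      match pvIdx.get? r.2.2.2 with
      | none => vec
      | some i => vec.set i.toNat (vec.getD i.toNat 0 + 1)) vec).getD j 0
      = vec.getD j 0 + (rows.countP (fun r => pvIdx.get? r.2.2.2 == some (j : Int)) : Int) := by
  induction rows generalizing vec with
  | nil => simp
  | cons r rs ih =>
    simp only [List.foldl_cons, List.countP_cons]
    rcases hidx : pvIdx.get? r.2.2.2 with _ | i
    · rw [ih vec hlen]
      simp
    · have hi : i = 0 ∨ i = 1 ∨ i = 2 ∨ i = 3 ∨ i = 4 := by
        rw [pvIdx_get] at hidx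
        split_ifs at hidx <;> simp_all
      have hiN : i.toNat < 5 := by rcases hi with h|h|h|h|h <;> subst h <;> decide
      rw [ih _ (by simp [hlen])]
      have hset : (vec.set i.toNat (vec.getD i.toNat 0 + 1)).getD j 0
          = vec.getD j 0 + (if i.toNat = j then 1 else 0) := by
        simp only [List.getD, List.getElem?_set]
        by_cases hEq : i.toNat = j
        · subst hEq
          simp [hiN, hlen]
        · simp [hEq]
      rw [hset]
      have h0 : (0 : Int) ≤ i := by rcases hi with h|h|h|h|h <;> simp [h]
      have hcmp : ((some i == some (j : Int)) = true) ↔ (i.toNat = j) := by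
        simp only [beq_iff_eq, Option.some.injEq]
        omega
      by_cases hEq : i.toNat = j
      · simp only [hEq, if_true, hcmp.mpr hEq]
        push_cast
        ring
      · have hb : (some i == some (j : Int)) = false :=
          eq_false_of_ne_true (fun h => hEq (hcmp.mp h))
        simp only [hEq, if_false, hb]
        push_cast
        ring

-- per category: slot j of a split's vector IS A's conditional scan of that split
theorem vec_eq_scan (rows : List (String × Int × Int × String)) (j : Nat) (hj : j < 5) :
    (rows.foldl (fun vec r =>
      match pvIdx.get? r.2.2.2 with
      | none => vec
      | some i => vec.set i.toNat (vec.getD i.toNat 0 + 1)) ([0, 0, 0, 0, 0] : List Int)).getD j 0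
      = rows.foldl (fun acc r => if r.2.2.2 == pvCats.getD j "" then acc + 1 else acc) (0 : Int) := by
  rw [vec_invariant rows _ (by decide) j hj, PySem.List.foldl_if_add_one]
  have : ∀ c : String,
      (pvIdx.get? c == some (j : Int)) = (c == pvCats.getD j "") := by
    intro c
    rw [pvIdx_get]
    interval_cases j <;>
      simp only [pvCats, List.getD_cons_zero, List.getD_cons_succ] <;>
      split_ifs with h1 h2 h3 h4 h5 <;> subst_vars <;>
      first
        | decide
        | (rw [beq_eq_false_iff_ne.mpr (fun h => h1 h.symm)]; decide)
        | (rw [beq_eq_false_iff_ne.mpr (fun h => h2 h.symm)]; decide)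
        | (rw [beq_eq_false_iff_ne.mpr (fun h => h3 h.symm)]; decide)
        | (rw [beq_eq_false_iff_ne.mpr (fun h => h4 h.symm)]; decide)
        | (rw [beq_eq_false_iff_ne.mpr (fun h => h5 h.symm)]; decide)
  rw [List.countP_congr (fun r _ => by rw [this r.2.2.2])]
  have h0 : ([0, 0, 0, 0, 0] : List Int).getD j 0 = 0 := by interval_cases j <;> rfl
  rw [h0]

-- ===== VERDICT (by name: the statement is the Claim_ definition above) =====
theorem count_summary_spec : Claim_equal_count_summary := by
  intro all_splits split_names _
  unfold Spec_count_summary count_summary count_summary_alt pvFmtRow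
  have e0 := fun rows => vec_eq_scan rows 0 (by norm_num)
  have e1 := fun rows => vec_eq_scan rows 1 (by norm_num)
  have e2 := fun rows => vec_eq_scan rows 2 (by norm_num)
  have e3 := fun rows => vec_eq_scan rows 3 (by norm_num)
  have e4 := fun rows => vec_eq_scan rows 4 (by norm_num)
  simp only [PySem.List.foldl_append_singleton_eq_map, List.nil_append, List.map_map,
    Function.comp_def]
  simp only [List.range_succ, List.range_zero, List.nil_append, List.map_cons, List.map_nil,
    List.map_append, List.cons_append]
  simp only [e0, e1, e2, e3, e4]
  simp [pvCats, pvLJI, str_join_append_singleton, String.append_assoc, List.map_map,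
    Function.comp_def]
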